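-- pv_equiv track=rewrite | github.com/Elite-Enigmas/bitfest2025-preli | Challenge 2 Folder/app/routes/chatbot.py | extract_first_recipe_block
-- ===== SOURCE A (Python) =====
-- def extract_first_recipe_block(response):
--     """
--     Extract the first recipe block from the response.
--     """
--     lines = response.splitlines()
--     start_collecting = False
--     collected_lines = []
--
--     for line in lines:
--         if line.startswith("#"):
--             if start_collecting:
--                 break
--             start_collecting = True
--             continue
--         if start_collecting:
--             collected_lines.append(line.strip())
--
--     return "\n".join(collected_lines)
-- ===== SOURCE B (Python) =====
-- def extract_first_recipe_block(response):
--     lines = response.splitlines()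
--     starts = [k for k, line in enumerate(lines) if line.startswith("#")]
--     if not starts:
--         return ""
--     i = starts[0]
--     j = starts[1] if len(starts) > 1 else len(lines)
--     return "\n".join(line.strip() for line in lines[i + 1:j])
-- ===== Notes on version B (the rewrite author's own statement) =====
-- stated objective: alternative
-- what changed: Replaces the stateful collecting-flag scan with an index-then-slice pass: compute the header-line indices once, then strip-and-join the slice between the first header and the next (or end).
import Mathlib
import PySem

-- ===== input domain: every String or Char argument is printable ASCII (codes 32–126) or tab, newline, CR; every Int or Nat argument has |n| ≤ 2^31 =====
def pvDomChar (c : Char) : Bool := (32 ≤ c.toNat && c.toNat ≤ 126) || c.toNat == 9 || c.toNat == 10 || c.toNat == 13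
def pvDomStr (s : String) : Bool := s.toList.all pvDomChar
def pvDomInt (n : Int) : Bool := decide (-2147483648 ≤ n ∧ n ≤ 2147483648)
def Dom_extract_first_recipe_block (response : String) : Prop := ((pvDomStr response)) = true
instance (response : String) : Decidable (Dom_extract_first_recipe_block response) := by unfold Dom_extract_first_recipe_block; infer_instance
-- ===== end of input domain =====

-- B replaces A's stateful collecting-flag scan with an index-then-slice pass (same cost, different decomposition).

-- ===== PORT A =====
-- the for-loop of A: state = (start_collecting, collected_lines); 'break' = return acc
def pvGoA : List String → Bool → List String → List String
  | [], _, acc => acc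
  | l :: rest, sc, acc =>
    if PySem.Str.startswith l "#" then
      if sc then acc else pvGoA rest true acc
    else if sc then pvGoA rest sc (acc ++ [PySem.Str.strip l]) else pvGoA rest sc acc

def extract_first_recipe_block (response : String) : String :=
  let lines := PySem.Str.splitlines response
  PySem.Str.join "\n" (pvGoA lines false [])

-- ===== PORT B =====
def extract_first_recipe_block_alt (response : String) : String :=
  let lines := PySem.Str.splitlines response
  let starts := ((PySem.List.enumerate lines 0).filter (fun p => PySem.Str.startswith p.2 "#")).map (·.1)
  match starts with
  | [] => ""
  | i :: rest =>
    let j : Int := match rest with | [] => (lines.length : Int) | j :: _ => j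
    PySem.Str.join "\n" ((PySem.List.slice lines (some (i + 1)) (some j)).map PySem.Str.strip)

-- ===== PRECONDITION & SPEC =====
def Spec_extract_first_recipe_block (response : String) (out : String) : Prop := out = extract_first_recipe_block_alt response
instance (response : String) (out : String) : Decidable (Spec_extract_first_recipe_block response out) := by unfold Spec_extract_first_recipe_block; infer_instance

-- ===== CLAIM (what is proved, stated in full; the proofs are below) =====
def Claim_equal_extract_first_recipe_block : Prop := ∀ (response : String), Dom_extract_first_recipe_block response → Spec_extract_first_recipe_block response (extract_first_recipe_block response)

-- ===== LEMMAS AND PROOFS =====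

-- abbreviation for the header test
def pvP (l : String) : Bool := PySem.Str.startswith l "#"

-- A in collecting phase appends the stripped prefix up to the next header
theorem pvGoA_true (rest : List String) (acc : List String) :
    pvGoA rest true acc = acc ++ (rest.takeWhile (fun l => !pvP l)).map PySem.Str.strip := by
  induction rest generalizing acc with
  | nil => simp [pvGoA]
  | cons l t ih =>
    by_cases hl : PySem.Chars.startswith l.toList ['#'] = true
    · simp [pvGoA, pvP, hl, List.takeWhile]
    · simp only [Bool.not_eq_true] at hl
      simp [pvGoA, pvP, hl, List.takeWhile, ih]

-- A before the first header skips header-free lines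
theorem pvGoA_false_skip (q : List String) (t : List String) (acc : List String)
    (hq : ∀ x ∈ q, pvP x = false) :
    pvGoA (q ++ t) false acc = pvGoA t false acc := by
  induction q with
  | nil => rfl
  | cons l r ih =>
    have hl : pvP l = false := hq l (by simp)
    simp [pvP] at hl
    simp [pvGoA, hl]
    exact ih (fun x hx => hq x (by simp [hx]))

theorem pvGoA_none (ls : List String) (acc : List String)
    (h : ∀ x ∈ ls, pvP x = false) : pvGoA ls false acc = acc := by
  induction ls with
  | nil => rfl
  | cons l r ih =>
    have hl : pvP l = false := h l (by simp)
    simp [pvP] at hl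
    simp [pvGoA, hl]
    exact ih (fun x hx => h x (by simp [hx]))

-- B's filtered enumeration over a header-free list is empty
theorem pvFilter_enum_nil (ls : List String) (s : Int)
    (h : ∀ x ∈ ls, pvP x = false) :
    (PySem.List.enumerate ls s).filter (fun p => PySem.Str.startswith p.2 "#") = [] := by
  induction ls generalizing s with
  | nil => simp [PySem.List.enumerate_nil]
  | cons l r ih =>
    have hl : pvP l = false := h l (by simp)
    simp [pvP] at hl
    have htail := ih (s + 1) (fun x hx => h x (by simp [hx]))
    simp [PySem.List.enumerate_cons, hl]
    simpa using htail

-- decompose a list containing a header at its first header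
theorem pvDecomp (ls : List String) (h : ¬ ∀ x ∈ ls, pvP x = false) :
    ∃ q h1 t, ls = q ++ h1 :: t ∧ (∀ x ∈ q, pvP x = false) ∧ pvP h1 = true := by
  induction ls with
  | nil => simp at h
  | cons l r ih =>
    by_cases hl : pvP l = true
    · exact ⟨[], l, r, by simp, by simp, hl⟩
    · simp only [Bool.not_eq_true] at hl
      have hr : ¬ ∀ x ∈ r, pvP x = false := by
        intro hr
        apply h
        intro x hx
        rcases List.mem_cons.1 hx with rfl | h2
        · exact hl
        · exact hr x h2
      obtain ⟨q, h1, t, e, hq, hh⟩ := ih hr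
      refine ⟨l :: q, h1, t, by simp [e], ?_, hh⟩
      intro x hx
      rcases List.mem_cons.1 hx with rfl | h2
      · exact hl
      · exact hq x h2

-- filtered enumeration of q ++ h :: r with q header-free: head index is s + q.length
theorem pvFilter_enum_decomp (q : List String) (h1 : String) (r : List String) (s : Int)
    (hq : ∀ x ∈ q, pvP x = false) (hh : pvP h1 = true) :
    (PySem.List.enumerate (q ++ h1 :: r) s).filter (fun p => PySem.Str.startswith p.2 "#")
      = (s + q.length, h1) ::
        (PySem.List.enumerate r (s + q.length + 1)).filter (fun p => PySem.Str.startswith p.2 "#") := by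
  rw [PySem.List.enumerate_append, List.filter_append, pvFilter_enum_nil q s hq]
  simp [pvP] at hh
  simp [PySem.List.enumerate_cons, hh]

theorem pvTakeWhile_decomp (q : List String) (h1 : String) (t : List String)
    (hq : ∀ x ∈ q, pvP x = false) (hh : pvP h1 = true) :
    (q ++ h1 :: t).takeWhile (fun l => !pvP l) = q := by
  induction q with
  | nil => simp [hh]
  | cons l r ih =>
    have hl : pvP l = false := hq l (by simp)
    simp [hl]
    exact ih (fun x hx => hq x (by simp [hx]))

-- drop past a header-prefix reaches the tail
theorem pvDrop_past (q : List String) (h1 : String) (t : List String) :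
    (q ++ h1 :: t).drop (q.length + 1) = t := by
  have e : q ++ h1 :: t = (q ++ [h1]) ++ t := by simp
  have hl : q.length + 1 = (q ++ [h1]).length := by simp
  rw [e, hl, List.drop_left]

-- the core list-level equivalence
theorem pvMain (ls : List String) :
    PySem.Str.join "\n" (pvGoA ls false []) =
      (match ((PySem.List.enumerate ls 0).filter (fun p => PySem.Str.startswith p.2 "#")).map (·.1) with
       | [] => ""
       | i :: rest =>
         let j : Int := match rest with | [] => (ls.length : Int) | j :: _ => j
         PySem.Str.join "\n" ((PySem.List.slice ls (some (i + 1)) (some j)).map PySem.Str.strip)) := by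
  by_cases hall : ∀ x ∈ ls, pvP x = false
  · rw [pvGoA_none ls [] hall, pvFilter_enum_nil ls 0 hall]
    simp [PySem.Str.join]
  · obtain ⟨q1, h1, t1, e1, hq1, hh1⟩ := pvDecomp ls hall
    subst e1
    have hh1c : PySem.Chars.startswith h1.toList ['#'] = true := by simpa [pvP] using hh1
    have hA : pvGoA (q1 ++ h1 :: t1) false [] =
        (t1.takeWhile (fun l => !pvP l)).map PySem.Str.strip := by
      rw [pvGoA_false_skip q1 (h1 :: t1) [] hq1]
      simp [pvGoA, hh1c, pvGoA_true]
    rw [hA, pvFilter_enum_decomp q1 h1 t1 0 hq1 hh1]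
    by_cases ht : ∀ x ∈ t1, pvP x = false
    · rw [pvFilter_enum_nil t1 (0 + q1.length + 1) ht]
      simp only [List.map_cons, List.map_nil]
      have hsl : PySem.List.slice (q1 ++ h1 :: t1) (some ((0 + (q1.length : Int)) + 1))
          (some (((q1 ++ h1 :: t1).length : Nat) : Int)) = t1 := by
        rw [show (0 + (q1.length : Int)) + 1 = ((q1.length + 1 : Nat) : Int) by push_cast; ring,
          PySem.List.slice_natCast, pvDrop_past]
        have : (q1 ++ h1 :: t1).length - (q1.length + 1) = t1.length := by
          simp only [List.length_append, List.length_cons]; omega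
        rw [this, List.take_length]
      rw [hsl]
      have htw : t1.takeWhile (fun l => !pvP l) = t1 :=
        List.takeWhile_eq_self_iff.2 (by intro x hx; simp [ht x hx])
      rw [htw]
    · obtain ⟨q2, h2, t2, e2, hq2, hh2⟩ := pvDecomp t1 ht
      subst e2
      rw [pvFilter_enum_decomp q2 h2 t2 _ hq2 hh2]
      simp only [List.map_cons]
      have hsl : PySem.List.slice (q1 ++ h1 :: (q2 ++ h2 :: t2)) (some ((0 + (q1.length : Int)) + 1))
          (some ((0 + (q1.length : Int)) + 1 + (q2.length : Int))) = q2 := by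
        rw [show (0 + (q1.length : Int)) + 1 = ((q1.length + 1 : Nat) : Int) by push_cast; ring,
          show ((q1.length + 1 : Nat) : Int) + (q2.length : Int) = ((q1.length + 1 + q2.length : Nat) : Int) by push_cast; ring,
          PySem.List.slice_natCast, pvDrop_past]
        have : q1.length + 1 + q2.length - (q1.length + 1) = q2.length := by omega
        rw [this, List.take_left]
      rw [hsl, pvTakeWhile_decomp q2 h2 t2 hq2 hh2]

-- ===== VERDICT (by name: the statement is the Claim_ definition above) =====
theorem extract_first_recipe_block_spec : Claim_equal_extract_first_recipe_block := by
  intro response _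
  show extract_first_recipe_block response = extract_first_recipe_block_alt response
  unfold extract_first_recipe_block extract_first_recipe_block_alt
  exact pvMain (PySem.Str.splitlines response)
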